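-- pv_equiv track=rewrite | github.com/ngimixin/hc_practice | python/my_calendar.py | generate_monthly_weeks
-- ===== SOURCE A (Python) =====
-- def generate_monthly_weeks(first_weekday, end_of_month):
--     days = [f"{v:>2}" for v in range(1, end_of_month+1)]
--     for _ in range(first_weekday):
--         days.insert(0, "  ") # type: ignore  # Pylance の誤検知を無視
--
--     weeks_l = [[], [], [], [], [], []]
--     days_iter = iter(days)
--     try:
--         for j in range(6):
--             while len(weeks_l[j]) < 7:
--                 weeks_l[j].append(next(days_iter))
--     except StopIteration:
--         raise
--     finally:
--         return weeks_l
-- ===== SOURCE B (Python) =====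
-- def generate_monthly_weeks(first_weekday, end_of_month):
--     days = ["  "] * first_weekday + [f"{v:>2}" for v in range(1, end_of_month + 1)]
--     return [days[i * 7 : i * 7 + 7] for i in range(6)]
-- ===== Notes on version B (the rewrite author's own statement) =====
-- stated objective: simpler
-- what changed: Builds the padded day list in one expression (list-repeat + comprehension instead of repeated insert(0,...)) and chunks it into six rows by index slicing, removing the shared cross-row iterator with its try/except StopIteration/finally machinery.
import Mathlib
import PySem

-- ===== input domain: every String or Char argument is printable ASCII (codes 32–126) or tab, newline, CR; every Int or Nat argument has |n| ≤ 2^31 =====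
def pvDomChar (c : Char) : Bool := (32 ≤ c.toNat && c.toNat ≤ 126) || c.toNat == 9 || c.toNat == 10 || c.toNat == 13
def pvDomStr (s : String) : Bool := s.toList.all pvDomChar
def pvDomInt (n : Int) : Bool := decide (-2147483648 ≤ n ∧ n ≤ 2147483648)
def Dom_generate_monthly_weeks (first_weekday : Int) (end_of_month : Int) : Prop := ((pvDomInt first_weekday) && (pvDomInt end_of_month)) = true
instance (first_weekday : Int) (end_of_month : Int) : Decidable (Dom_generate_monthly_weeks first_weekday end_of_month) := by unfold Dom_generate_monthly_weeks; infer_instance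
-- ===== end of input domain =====

-- B replaces A's insert(0,...) loop and the shared cross-row iterator (with try/StopIteration/finally)
-- by building the flat day list once and chunking it into six rows by index slicing (objective: simpler).

-- ===== PORT A =====
-- f"{v:>2}": str(v) right-justified with spaces to width 2 (exact: pad only when str(v) is shorter than 2)
def pvFmt2 (v : Int) : String :=
  let cs := PySem.Int.toChars v
  String.ofList (List.replicate (2 - cs.length) ' ' ++ cs)

-- inner 'while len(weeks_l[j]) < 7: weeks_l[j].append(next(days_iter))':
-- returns (the row built, the remaining iterator, true iff no StopIteration)
def pvFillRow : Nat → List String → (List String × List String × Bool)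
  | 0, ds => ([], ds, true)
  | _ + 1, [] => ([], [], false)
  | n + 1, d :: rest =>
      let r := pvFillRow n rest
      (d :: r.1, r.2.1, r.2.2)

-- 'for j in range(6)': fill rows in order; on StopIteration the remaining pre-initialised rows stay []
def pvFillWeeks : Nat → List String → List (List String)
  | 0, _ => []
  | j + 1, ds =>
      let r := pvFillRow 7 ds
      if r.2.2 then r.1 :: pvFillWeeks j r.2.1 else r.1 :: List.replicate j []

def generate_monthly_weeks (first_weekday : Int) (end_of_month : Int) : List (List String) :=
  let days0 := (PySem.List.pyRange 1 (end_of_month + 1) 1).map pvFmt2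
  let days := (PySem.List.pyRange 0 first_weekday 1).foldl (fun d _ => "  " :: d) days0
  pvFillWeeks 6 days

-- ===== PORT B =====
def generate_monthly_weeks_alt (first_weekday : Int) (end_of_month : Int) : List (List String) :=
  let days := List.replicate first_weekday.toNat "  "
      ++ (PySem.List.pyRange 1 (end_of_month + 1) 1).map pvFmt2
  (PySem.List.pyRange 0 6 1).map (fun i => PySem.List.slice days (some (i * 7)) (some (i * 7 + 7)))

-- ===== PRECONDITION & SPEC =====
def Spec_generate_monthly_weeks (first_weekday : Int) (end_of_month : Int) (out : List (List String)) : Prop := out = generate_monthly_weeks_alt first_weekday end_of_month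
instance (first_weekday : Int) (end_of_month : Int) (out : List (List String)) : Decidable (Spec_generate_monthly_weeks first_weekday end_of_month out) := by unfold Spec_generate_monthly_weeks; infer_instance

-- ===== CLAIM (what is proved, stated in full; the proofs are below) =====
def Claim_equal_generate_monthly_weeks : Prop := ∀ (first_weekday : Int) (end_of_month : Int), Dom_generate_monthly_weeks first_weekday end_of_month → Spec_generate_monthly_weeks first_weekday end_of_month (generate_monthly_weeks first_weekday end_of_month)

-- ===== LEMMAS AND PROOFS =====

theorem pvFillRow_eq (n : Nat) (ds : List String) :
    pvFillRow n ds = (ds.take n, ds.drop n, decide (n ≤ ds.length)) := by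
  induction n generalizing ds with
  | zero => simp [pvFillRow]
  | succ n ih =>
    cases ds with
    | nil => simp [pvFillRow]
    | cons d rest => simp [pvFillRow, ih rest]

theorem pvFillWeeks_eq (j : Nat) (ds : List String) :
    pvFillWeeks j ds = (List.range j).map (fun i => (ds.drop (7 * i)).take 7) := by
  induction j generalizing ds with
  | zero => rfl
  | succ j ih =>
    rw [List.range_succ_eq_map]
    simp only [pvFillWeeks, pvFillRow_eq, List.map_cons, List.map_map]
    by_cases h : 7 ≤ ds.length
    · rw [if_pos (by simp [h])]
      simp only [Nat.mul_zero, List.drop_zero]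
      rw [ih]
      congr 1
      apply List.map_congr_left
      intro i _
      simp [List.drop_drop, Nat.mul_succ, Nat.add_comm]
    · rw [if_neg (by simp [h])]
      simp only [Nat.mul_zero, List.drop_zero]
      congr 1
      have hz : ∀ i ∈ List.range j,
          ((fun i => (ds.drop (7 * i)).take 7) ∘ Nat.succ) i = ([] : List String) := by
        intro i _
        have : ds.drop (7 * (i + 1)) = [] := List.drop_eq_nil_of_le (by omega)
        simp [Function.comp, Nat.succ_eq_add_one, this]
      rw [List.map_congr_left hz]
      simp

theorem foldl_cons_replicate (x : String) (l : List Int) (init : List String) :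
    l.foldl (fun d _ => x :: d) init = List.replicate l.length x ++ init := by
  induction l generalizing init with
  | nil => rfl
  | cons a l ih =>
    simp only [List.foldl_cons, ih (x :: init), List.length_cons]
    rw [List.replicate_succ']
    simp

-- ===== VERDICT (by name: the statement is the Claim_ definition above) =====
theorem generate_monthly_weeks_spec : Claim_equal_generate_monthly_weeks := by
  intro fw eom _
  unfold Spec_generate_monthly_weeks generate_monthly_weeks generate_monthly_weeks_alt
  show pvFillWeeks 6 ((PySem.List.pyRange 0 fw 1).foldl (fun d _ => "  " :: d)
        ((PySem.List.pyRange 1 (eom + 1) 1).map pvFmt2)) =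
      (PySem.List.pyRange 0 6 1).map (fun i =>
        PySem.List.slice (List.replicate fw.toNat "  " ++ (PySem.List.pyRange 1 (eom + 1) 1).map pvFmt2)
          (some (i * 7)) (some (i * 7 + 7)))
  rw [foldl_cons_replicate, PySem.List.length_pyRange_one]
  have h6 : PySem.List.pyRange 0 6 1 = [0, 1, 2, 3, 4, 5] := by decide
  rw [pvFillWeeks_eq, h6]
  have hfw : (fw - 0).toNat = fw.toNat := by omega
  rw [hfw]
  set ds := List.replicate fw.toNat "  " ++ (PySem.List.pyRange 1 (eom + 1) 1).map pvFmt2 with hds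
  have hs : ∀ a : Nat, PySem.List.slice ds (some (a : Int)) (some ((a : Int) + 7)) =
      (ds.drop a).take 7 := by
    intro a
    exact_mod_cast PySem.List.slice_natCast_add ds a 7
  show [(ds.drop (7 * 0)).take 7, (ds.drop (7 * 1)).take 7, (ds.drop (7 * 2)).take 7,
        (ds.drop (7 * 3)).take 7, (ds.drop (7 * 4)).take 7, (ds.drop (7 * 5)).take 7] = _
  simp only [List.map_cons, List.map_nil]
  rw [show ((0:Int) * 7) = ((0:Nat):Int) by norm_num]
  rw [show ((1:Int) * 7) = ((7:Nat):Int) by norm_num]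
  rw [show ((2:Int) * 7) = ((14:Nat):Int) by norm_num]
  rw [show ((3:Int) * 7) = ((21:Nat):Int) by norm_num]
  rw [show ((4:Int) * 7) = ((28:Nat):Int) by norm_num]
  rw [show ((5:Int) * 7) = ((35:Nat):Int) by norm_num]
  rw [hs 0, hs 7, hs 14, hs 21, hs 28, hs 35]
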